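-- pv_equiv track=rewrite | github.com/aryanrai97861/Universal-Document-Intelligence-Chatbot | components/document_processor.py | _find_sentence_break
-- ===== SOURCE A (Python) =====
-- def _find_sentence_break(text: str, start: int, end: int) -> int:
--     """
--     Find the best sentence break point within a range
--
--     Args:
--         text: Input text
--         start: Start position
--         end: End position
--
--     Returns:
--         Best break point or -1 if none found
--     """
--     # Look for sentence endings near the end
--     search_start = max(start, end - 200)
--
--     # Sentence ending patterns
--     sentence_ends = ['. ', '! ', '? ', '.\n', '!\n', '?\n']
--
--     best_break = -1
--     for pattern in sentence_ends:
--         pos = text.rfind(pattern, search_start, end)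
--         if pos != -1:
--             best_break = max(best_break, pos + len(pattern))
--
--     return best_break
-- ===== SOURCE B (Python) =====
-- def _find_sentence_break(text: str, start: int, end: int) -> int:
--     # Single backward scan over the last up-to-200 characters of the range:
--     # return 2 past the rightmost '.'/'!'/'?' followed by a space or newline.
--     lo = max(start, end - 200, 0)
--     hi = min(end, len(text))
--     for i in range(hi - 2, lo - 1, -1):
--         if text[i] in '.!?' and text[i + 1] in ' \n':
--             return i + 2
--     return -1
-- ===== Notes on version B (the rewrite author's own statement) =====
-- stated objective: simpler
-- what changed: Replaces six str.rfind scans (one per two-char pattern) plus a running max with a single backward scan of the clamped window that returns at the first index whose char is in '.!?' followed by ' ' or '\n'; Pre_ excludes negative start/end, where A's delegation to str.rfind applies negative-slice wraparound relative to the end of the text, an accidental reading for a position-based helper on which B simply clamps positions into the text.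
-- outside the precondition, e.g. on _find_sentence_break('Bye. Hi', -3, 7): A returns -1, B returns 5; on _find_sentence_break('Hi. Bye', 0, -2): A returns 4, B returns -1
import Mathlib
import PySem

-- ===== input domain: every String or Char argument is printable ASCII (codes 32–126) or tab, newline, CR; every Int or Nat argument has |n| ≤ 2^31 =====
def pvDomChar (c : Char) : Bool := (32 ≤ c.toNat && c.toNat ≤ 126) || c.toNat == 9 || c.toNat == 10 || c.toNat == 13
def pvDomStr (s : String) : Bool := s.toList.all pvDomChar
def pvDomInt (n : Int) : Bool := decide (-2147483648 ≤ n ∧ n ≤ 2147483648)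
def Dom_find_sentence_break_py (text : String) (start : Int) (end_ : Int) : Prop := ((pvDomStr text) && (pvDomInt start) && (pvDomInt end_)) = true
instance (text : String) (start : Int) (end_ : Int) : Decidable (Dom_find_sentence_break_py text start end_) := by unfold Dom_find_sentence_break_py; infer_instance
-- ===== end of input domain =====

-- B replaces A's six rfind scans with one backward scan of the clamped window; simpler decomposition, same cost class.

-- ===== PORT A =====
-- Literal port of A: PySem.Str.rfindFrom is exact str.rfind with slice bounds.
def find_sentence_break_py (text : String) (start : Int) (end_ : Int) : Int :=
  let search_start := max start (end_ - 200)
  let sentence_ends : List String := [". ", "! ", "? ", ".\n", "!\n", "?\n"]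
  sentence_ends.foldl
    (fun best_break pattern =>
      let pos := PySem.Str.rfindFrom text pattern search_start (some end_)
      if pos ≠ -1 then max best_break (pos + (PySem.Str.len pattern : Int)) else best_break)
    (-1)

-- ===== PORT B =====
def pvIsEnd (c : Char) : Bool := c == '.' || c == '!' || c == '?'
def pvIsSp (c : Char) : Bool := c == ' ' || c == '\n'
-- text[i] in '.!?' and text[i+1] in ' \n' (indices valid at every call site)
def pvHit (cs : List Char) (i : Nat) : Bool :=
  match cs[i]?, cs[i + 1]? with
  | some a, some b => pvIsEnd a && pvIsSp b
  | _, _ => false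

-- the for loop: i goes down from hi-2 to lo
def pvScan (cs : List Char) (s : Int) (i : Int) : Int :=
  if i < s then -1
  else if pvHit cs i.toNat then i + 2
  else pvScan cs s (i - 1)
termination_by (i + 1 - s).toNat
decreasing_by omega

def find_sentence_break_py_alt (text : String) (start : Int) (end_ : Int) : Int :=
  let cs := text.toList
  let lo := max (max start (end_ - 200)) 0
  let hi := min end_ (cs.length : Int)
  pvScan cs lo (hi - 2)

-- ===== PRECONDITION & SPEC =====
-- Pre_ excludes negative start/end, on which A's str.rfind interprets the bounds by
-- negative-slice wraparound from the text's end — an accidental reading for this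
-- position-based helper, where B clamps positions into the text instead.
def Pre_find_sentence_break_py (text : String) (start : Int) (end_ : Int) : Prop :=
  0 ≤ start ∧ 0 ≤ end_
instance (text : String) (start : Int) (end_ : Int) : Decidable (Pre_find_sentence_break_py text start end_) := by unfold Pre_find_sentence_break_py; infer_instance

def pvWitness_find_sentence_break_py : String × Int × Int := ("Hi. Bye", 0, 7)

def Spec_find_sentence_break_py (text : String) (start : Int) (end_ : Int) (out : Int) : Prop := out = find_sentence_break_py_alt text start end_
instance (text : String) (start : Int) (end_ : Int) (out : Int) : Decidable (Spec_find_sentence_break_py text start end_ out) := by unfold Spec_find_sentence_break_py; infer_instance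

-- ===== CLAIM (what is proved, stated in full; the proofs are below) =====
def Claim_equal_find_sentence_break_py : Prop := ∀ (text : String) (start : Int) (end_ : Int), Dom_find_sentence_break_py text start end_ → Pre_find_sentence_break_py text start end_ → Spec_find_sentence_break_py text start end_ (find_sentence_break_py text start end_)

-- ===== LEMMAS AND PROOFS =====

-- the six two-char patterns, as char lists
def pvPats : List (List Char) := [['.', ' '], ['!', ' '], ['?', ' '], ['.', '\n'], ['!', '\n'], ['?', '\n']]

-- a pattern's contribution to A's max (fuel k)
def pvG (w : List Char) (st : Int) (p : List Char) (k : Nat) : Int :=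
  if PySem.Chars.rfind.go w p k = -1 then -1 else st + PySem.Chars.rfind.go w p k + 2

theorem pv_prefix2 (c d : Char) (xs : List Char) :
    List.isPrefixOf [c, d] xs = (xs[0]? == some c && xs[1]? == some d) := by
  match xs with
  | [] => rfl
  | [a] => simp [List.isPrefixOf]
  | a :: b :: t => simp [List.isPrefixOf, BEq.comm]

theorem pv_go_succ (w p : List Char) (j : Nat) :
    PySem.Chars.rfind.go w p (j + 1) =
      if List.isPrefixOf p (List.drop (j + 1) w) then ((j : Int) + 1) else PySem.Chars.rfind.go w p j := by
  simp [PySem.Chars.rfind.go]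

theorem pv_go_zero (w p : List Char) :
    PySem.Chars.rfind.go w p 0 = if List.isPrefixOf p w then 0 else -1 := rfl

theorem pv_go_range (w p : List Char) (k : Nat) :
    PySem.Chars.rfind.go w p k = -1 ∨ (0 ≤ PySem.Chars.rfind.go w p k ∧ PySem.Chars.rfind.go w p k ≤ k) := by
  induction k with
  | zero => rw [pv_go_zero]; split <;> simp
  | succ j ih =>
      rw [pv_go_succ]
      split
      · right; constructor <;> push_cast <;> omega
      · rcases ih with h | h
        · left; exact h
        · right; push_cast; omega

theorem pv_rfindFrom_norm (cs sub : List Char) (start end_ : Int) :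
    PySem.Chars.rfindFrom cs sub start (some end_) =
      (let n : Int := cs.length
       let e := if n < end_ then n else if end_ < 0 then (if end_ + n < 0 then 0 else end_ + n) else end_
       let st := if start < 0 then (if start + n < 0 then 0 else start + n) else start
       if e < st then -1
       else
         if PySem.Chars.rfind ((cs.take e.toNat).drop st.toNat) sub = -1 then -1
         else st + PySem.Chars.rfind ((cs.take e.toNat).drop st.toNat) sub) := by
  rfl

theorem pvG_ge (w : List Char) (st : Int) (hst : 0 ≤ st) (p : List Char) (k : Nat) : -1 ≤ pvG w st p k := by
  have hr := pv_go_range w p k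
  unfold pvG
  split <;> omega

theorem pvG_le (w : List Char) (st : Int) (p : List Char) (k : Nat) :
    pvG w st p k ≤ st + k + 2 ∨ pvG w st p k = -1 := by
  have hr := pv_go_range w p k
  unfold pvG
  rcases hr with h | h
  · right; simp [h]
  · left; rw [if_neg (by omega)]; omega

theorem pv_foldl_ext_inv (f g : Int → List Char → Int) (inv : Int → Prop)
    (hfg : ∀ b p, inv b → f b p = g b p) (hg : ∀ b p, inv b → inv (g b p)) :
    ∀ (ps : List (List Char)) (b : Int), inv b → ps.foldl f b = ps.foldl g b := by
  intro ps
  induction ps with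
  | nil => intro b _; rfl
  | cons p ps ih =>
      intro b hb
      rw [List.foldl_cons, List.foldl_cons, hfg b p hb]
      exact ih _ (hg b p hb)

-- the A-side fold, with the skip branch rewritten as a max against pvG
theorem pv_fold_to_max (w : List Char) (st : Int) (hst : 0 ≤ st) (k : Nat)
    (ps : List (List Char)) (b : Int) (hb : -1 ≤ b) :
    ps.foldl
      (fun b p =>
        let pos := if PySem.Chars.rfind.go w p k = -1 then -1 else st + PySem.Chars.rfind.go w p k
        if pos ≠ -1 then max b (pos + 2) else b) b
    = ps.foldl (fun b p => max b (pvG w st p k)) b := by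
  apply pv_foldl_ext_inv _ _ (fun b => -1 ≤ b) _ _ ps b hb
  · intro b p hb
    have hr := pv_go_range w p k
    show (let pos := if PySem.Chars.rfind.go w p k = -1 then -1 else st + PySem.Chars.rfind.go w p k
          if pos ≠ -1 then max b (pos + 2) else b) = max b (pvG w st p k)
    by_cases h : PySem.Chars.rfind.go w p k = -1
    · simp only [h, ite_true, ne_eq, not_true_eq_false, if_false, pvG]
      omega
    · have h0 : 0 ≤ PySem.Chars.rfind.go w p k := by rcases hr with h' | h' <;> omega
      simp only [h, ite_false, ne_eq, pvG]
      rw [if_pos (by omega)]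
  · intro b p hb
    have := pvG_ge w st hst p k
    show -1 ≤ max b (pvG w st p k)
    omega

theorem pv_fold_const (w : List Char) (st : Int) (k : Nat) (ps : List (List Char)) (b : Int)
    (hb : ∀ p ∈ ps, pvG w st p k ≤ b) :
    ps.foldl (fun b p => max b (pvG w st p k)) b = b := by
  induction ps generalizing b with
  | nil => rfl
  | cons p ps ih =>
      rw [List.foldl_cons]
      rw [show max b (pvG w st p k) = b by have := hb p (by simp); omega]
      exact ih b (fun q hq => hb q (by simp [hq]))

theorem pv_fold_step (w : List Char) (st : Int) (hst : 0 ≤ st) (k : Nat)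
    (ps : List (List Char)) (b : Int) (hb : b ≤ st + k + 2) :
    ps.foldl (fun b p => max b (pvG w st p (k + 1))) b =
      if ps.any (fun p => List.isPrefixOf p (List.drop (k + 1) w)) then st + k + 3
      else ps.foldl (fun b p => max b (pvG w st p k)) b := by
  induction ps generalizing b with
  | nil => simp
  | cons p ps ih =>
      by_cases h : List.isPrefixOf p (List.drop (k + 1) w)
      · simp only [List.any_cons, h, Bool.true_or, if_pos, List.foldl_cons]
        have hg : pvG w st p (k + 1) = st + k + 3 := by
          unfold pvG; rw [pv_go_succ, if_pos h]
          rw [if_neg (by omega)]; ring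
        rw [hg, show max b (st + k + 3) = st + k + 3 by omega]
        apply pv_fold_const
        intro q hq
        rcases pvG_le w st q (k + 1) with h' | h' <;> push_cast at h' ⊢ <;> omega
      · have hg : pvG w st p (k + 1) = pvG w st p k := by
          unfold pvG; rw [pv_go_succ, if_neg h]
        simp only [List.any_cons, h, Bool.false_or, List.foldl_cons, hg]
        have hb' : max b (pvG w st p k) ≤ st + k + 2 := by
          rcases pvG_le w st p k with h' | h' <;> omega
        exact ih _ hb'

theorem pv_fold_zero (w : List Char) (st : Int) (hst : 0 ≤ st)
    (ps : List (List Char)) (b : Int) (hb : -1 ≤ b) (hb2 : b ≤ st + 2) :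
    ps.foldl (fun b p => max b (pvG w st p 0)) b =
      if ps.any (fun p => List.isPrefixOf p w) then st + 2 else b := by
  induction ps generalizing b with
  | nil => simp
  | cons p ps ih =>
      by_cases h : List.isPrefixOf p w
      · simp only [List.any_cons, h, Bool.true_or, if_pos, List.foldl_cons]
        have hg : pvG w st p 0 = st + 2 := by
          unfold pvG; rw [pv_go_zero, if_pos h]; simp
        rw [hg, show max b (st + 2) = st + 2 by omega]
        apply pv_fold_const
        intro q hq
        rcases pvG_le w st q 0 with h' | h' <;> push_cast at h' ⊢ <;> omega
      · have hg : pvG w st p 0 = -1 := by unfold pvG; rw [pv_go_zero, if_neg h]; simp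
        simp only [List.any_cons, h, Bool.false_or, List.foldl_cons, hg]
        rw [show max b (-1) = b by omega]
        exact ih b hb hb2

-- booleans: the disjunction of the six pattern tests equals pvHit's test
theorem pv_bool6 (x1 x2 x3 y1 y2 : Bool) :
    (x1 && y1 || (x2 && y1 || (x3 && y1 || (x1 && y2 || (x2 && y2 || x3 && y2))))) =
      ((x1 || x2 || x3) && (y1 || y2)) := by
  revert x1 x2 x3 y1 y2; decide

-- anyHit at offset j equals pvHit at absolute index st+j, inside the window
theorem pv_anyHit (cs : List Char) (S E : Nat) (hE : E ≤ cs.length) (j : Nat) (hj : S + j + 2 ≤ E) :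
    (pvPats.any (fun p => List.isPrefixOf p (List.drop j ((cs.take E).drop S)))) =
      pvHit cs (S + j) := by
  have h0 : (List.drop j ((cs.take E).drop S))[0]? = cs[S + j]? := by
    simp only [List.getElem?_drop, List.getElem?_take]
    rw [if_pos (by omega)]
    congr 1
  have h1 : (List.drop j ((cs.take E).drop S))[1]? = cs[S + j + 1]? := by
    simp only [List.getElem?_drop, List.getElem?_take]
    rw [if_pos (by omega)]
    congr 1
  have hlt : S + j < cs.length := by omega
  have hlt1 : S + j + 1 < cs.length := by omega
  simp only [pvPats, List.any_cons, List.any_nil, pv_prefix2, h0, h1, Bool.or_false]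
  unfold pvHit
  rw [List.getElem?_eq_getElem hlt, List.getElem?_eq_getElem hlt1]
  show (_ = (pvIsEnd cs[S + j] && pvIsSp cs[S + j + 1]))
  rw [show ∀ (a c : Char), ((some a == some c) : Bool) = (a == c) from fun _ _ => rfl,
      show ∀ (a c : Char), ((some a == some c) : Bool) = (a == c) from fun _ _ => rfl]
  unfold pvIsEnd pvIsSp
  exact pv_bool6 _ _ _ _ _

-- main induction: A's fold at fuel k equals B's scan from absolute index st+k
theorem pv_main (cs : List Char) (st e : Int) (hst : 0 ≤ st) (he : e ≤ cs.length)
    (k : Nat) (hk : st + k + 2 ≤ e) :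
    pvPats.foldl (fun b p => max b (pvG ((cs.take e.toNat).drop st.toNat) st p k)) (-1) =
      pvScan cs st (st + k) := by
  induction k with
  | zero =>
      rw [pv_fold_zero _ _ hst _ _ (by omega) (by omega)]
      have hAny := pv_anyHit cs st.toNat e.toNat (by omega) 0 (by omega)
      simp only [List.drop_zero, Nat.add_zero] at hAny
      rw [pvScan]
      rw [if_neg (show ¬(st + ((0 : Nat) : Int) < st) by push_cast; omega)]
      rw [show (st + ((0 : Nat) : Int)).toNat = st.toNat by omega]
      rw [hAny]
      by_cases hh : pvHit cs st.toNat
      · rw [if_pos hh, if_pos hh]; push_cast; ring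
      · rw [if_neg hh, if_neg hh]
        rw [pvScan]
        rw [if_pos (by push_cast; omega)]
  | succ j ih =>
      rw [pv_fold_step _ _ hst _ _ _ (by omega)]
      have hAny := pv_anyHit cs st.toNat e.toNat (by omega) (j + 1) (by omega)
      rw [pvScan]
      rw [if_neg (show ¬(st + ((j + 1 : Nat) : Int) < st) by push_cast; omega)]
      rw [show (st + ((j + 1 : Nat) : Int)).toNat = st.toNat + (j + 1) by omega]
      rw [hAny]
      by_cases hh : pvHit cs (st.toNat + (j + 1))
      · rw [if_pos hh, if_pos hh]; push_cast; ring
      · rw [if_neg hh, if_neg hh]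
        rw [ih (by omega)]
        congr 1
        push_cast; ring

theorem pv_any_short (xs : List Char) (h : xs[1]? = none) :
    pvPats.any (fun p => List.isPrefixOf p xs) = false := by
  simp [pvPats, pv_prefix2, h]

-- A's whole fold (bounds already normalized) equals B's scan
theorem pv_assemble (cs : List Char) (st e : Int) (hst0 : 0 ≤ st) (he0 : 0 ≤ e)
    (heN : e ≤ (cs.length : Int)) :
    pvPats.foldl
      (fun b p =>
        let pos :=
          if e < st then -1
          else
            if PySem.Chars.rfind ((cs.take e.toNat).drop st.toNat) p = -1 then -1
            else st + PySem.Chars.rfind ((cs.take e.toNat).drop st.toNat) p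
        if pos ≠ -1 then max b (pos + 2) else b) (-1)
    = pvScan cs st (e - 2) := by
  by_cases hcase : e < st
  · simp only [if_pos hcase, ne_eq, not_true_eq_false, if_false, pvPats,
      List.foldl_cons, List.foldl_nil]
    rw [pvScan, if_pos (by omega)]
  · simp only [if_neg hcase, PySem.Chars.rfind]
    rw [pv_fold_to_max _ _ hst0 _ _ _ (by omega)]
    have hw : ((cs.take e.toNat).drop st.toNat).length = e.toNat - st.toNat := by
      simp only [List.length_drop, List.length_take]
      omega
    by_cases h2 : 2 ≤ e - st
    · obtain ⟨m, hm⟩ : ∃ m, ((cs.take e.toNat).drop st.toNat).length = m + 2 :=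
        ⟨((cs.take e.toNat).drop st.toNat).length - 2, by omega⟩
      rw [hm]
      rw [pv_fold_step _ _ hst0 _ _ _ (by omega)]
      rw [pv_any_short _ (by
        apply List.getElem?_eq_none
        simp only [List.length_drop, hm]
        omega)]
      rw [if_neg (by simp)]
      rw [pv_fold_step _ _ hst0 _ _ _ (by omega)]
      rw [pv_any_short _ (by
        apply List.getElem?_eq_none
        simp only [List.length_drop, hm]
        omega)]
      rw [if_neg (by simp)]
      rw [pv_main cs st e hst0 heN m (by omega)]
      congr 1
      omega
    · have hsmall : ((cs.take e.toNat).drop st.toNat).length = 0 ∨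
          ((cs.take e.toNat).drop st.toNat).length = 1 := by omega
      have hrhs : pvScan cs st (e - 2) = -1 := by
        rw [pvScan, if_pos (by omega)]
      rcases hsmall with h | h
      · rw [h]
        rw [pv_fold_zero _ _ hst0 _ _ (by omega) (by omega)]
        rw [pv_any_short _ (by apply List.getElem?_eq_none; omega)]
        rw [if_neg (by simp), hrhs]
      · rw [h]
        rw [pv_fold_step _ _ hst0 _ _ _ (by omega)]
        rw [pv_any_short _ (by
          apply List.getElem?_eq_none
          simp only [List.length_drop, h]
          omega)]
        rw [if_neg (by simp)]
        rw [pv_fold_zero _ _ hst0 _ _ (by omega) (by omega)]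
        rw [pv_any_short _ (by apply List.getElem?_eq_none; omega)]
        rw [if_neg (by simp), hrhs]

-- A's port rewritten as a fold over pvPats (pattern lengths evaluated)
theorem pvA_eq (text : String) (start end_ : Int) :
    find_sentence_break_py text start end_ =
      pvPats.foldl
        (fun b p =>
          let pos := PySem.Chars.rfindFrom text.toList p (max start (end_ - 200)) (some end_)
          if pos ≠ -1 then max b (pos + 2) else b) (-1) := rfl

-- ===== VERDICT (by name: the statement is the Claim_ definition above) =====
theorem find_sentence_break_py_spec : Claim_equal_find_sentence_break_py := by
  intro text start end_ _hdom hpre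
  obtain ⟨hs, he⟩ := hpre
  unfold Spec_find_sentence_break_py find_sentence_break_py_alt
  rw [pvA_eq]
  simp only [pv_rfindFrom_norm]
  rw [pv_assemble _ _ _ (by split_ifs <;> omega) (by split_ifs <;> omega)
      (by split_ifs <;> omega)]
  congr 1 <;> split_ifs <;> omega
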